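-- pv_equiv track=rewrite | github.com/great-luao/ace-appworld | experiments/code/ace/prediction_diff_classifier.py | build_aggregate_suffix
-- ===== SOURCE A (Python) =====
-- from typing import Any
--
-- def build_aggregate_suffix(task_summaries: list[dict[str, Any]]) -> str:
--     all_suffixes = {summary.get("output_file_suffix", "") for summary in task_summaries}
--     non_empty_suffixes = {suffix for suffix in all_suffixes if suffix}
--     if "" in all_suffixes and non_empty_suffixes:
--         return ".partial_mixed"
--     if len(non_empty_suffixes) == 1:
--         return non_empty_suffixes.pop()
--     if len(non_empty_suffixes) > 1:
--         return ".partial_mixed"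
--     return ""
-- ===== SOURCE B (Python) =====
-- def build_aggregate_suffix(task_summaries: list) -> str:
--     has_empty = False
--     first = None
--     mixed = False
--     for summary in task_summaries:
--         s = summary.get("output_file_suffix", "")
--         if s == "":
--             has_empty = True
--         elif first is None:
--             first = s
--         elif s != first:
--             mixed = True
--     if mixed or (first is not None and has_empty):
--         return ".partial_mixed"
--     return first if first is not None else ""
-- ===== Notes on version B (the rewrite author's own statement) =====
-- stated objective: simpler
-- what changed: Replaces the two set comprehensions and four-way length/membership branching with a single pass that tracks three scalar flags (has_empty, first non-empty suffix, mixed), so no set is ever materialised.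
import Mathlib
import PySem

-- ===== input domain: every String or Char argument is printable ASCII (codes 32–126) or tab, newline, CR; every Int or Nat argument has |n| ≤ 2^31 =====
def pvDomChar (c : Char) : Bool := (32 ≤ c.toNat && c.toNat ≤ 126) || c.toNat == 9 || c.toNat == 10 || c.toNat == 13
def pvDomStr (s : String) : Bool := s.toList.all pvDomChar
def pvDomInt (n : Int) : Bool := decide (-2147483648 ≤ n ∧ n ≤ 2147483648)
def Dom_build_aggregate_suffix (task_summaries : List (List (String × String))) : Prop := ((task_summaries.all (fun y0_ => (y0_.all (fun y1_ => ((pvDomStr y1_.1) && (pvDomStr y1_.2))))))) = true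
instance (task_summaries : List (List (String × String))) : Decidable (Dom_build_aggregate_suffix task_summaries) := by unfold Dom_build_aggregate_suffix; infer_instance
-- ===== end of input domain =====

-- B replaces A's two set comprehensions with one fold over three scalar flags; objective: simpler.

-- ===== PORT A =====
def build_aggregate_suffix (task_summaries : List (List (String × String))) : String :=
  let all_suffixes : PySem.Set String :=
    PySem.Set.ofList (task_summaries.map (fun summary => PySem.Dict.getD (PySem.Dict.mk summary) "output_file_suffix" ""))
  let non_empty_suffixes : PySem.Set String := all_suffixes.filter (fun s => !(s == ""))
  if PySem.Set.contains all_suffixes "" && !(non_empty_suffixes.length == 0) then ".partial_mixed"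
  else if non_empty_suffixes.length == 1 then non_empty_suffixes.headD ""  -- .pop() on a singleton set
  else if non_empty_suffixes.length > 1 then ".partial_mixed"
  else ""

-- ===== PORT B =====
def pvAltStep (st : Bool × Option String × Bool) (summary : List (String × String)) :
    Bool × Option String × Bool :=
  let s := PySem.Dict.getD (PySem.Dict.mk summary) "output_file_suffix" ""
  if s == "" then (true, st.2.1, st.2.2)
  else
    match st.2.1 with
    | none => (st.1, some s, st.2.2)
    | some f => if s == f then st else (st.1, st.2.1, true)

def build_aggregate_suffix_alt (task_summaries : List (List (String × String))) : String :=
  let st := task_summaries.foldl pvAltStep (false, none, false)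
  if st.2.2 || (st.2.1.isSome && st.1) then ".partial_mixed"
  else st.2.1.getD ""

-- ===== PRECONDITION & SPEC =====
def Spec_build_aggregate_suffix (task_summaries : List (List (String × String))) (out : String) : Prop := out = build_aggregate_suffix_alt task_summaries
instance (task_summaries : List (List (String × String))) (out : String) : Decidable (Spec_build_aggregate_suffix task_summaries out) := by unfold Spec_build_aggregate_suffix; infer_instance

-- ===== CLAIM (what is proved, stated in full; the proofs are below) =====
def Claim_equal_build_aggregate_suffix : Prop := ∀ (task_summaries : List (List (String × String))), Dom_build_aggregate_suffix task_summaries → Spec_build_aggregate_suffix task_summaries (build_aggregate_suffix task_summaries)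

-- ===== LEMMAS AND PROOFS =====

-- A's final branching as a function of the accumulated set
def pvFinA (acc : List String) : String :=
  let ne := acc.filter (fun s => !(s == ""))
  if acc.contains "" && !(ne.length == 0) then ".partial_mixed"
  else if ne.length == 1 then ne.headD ""
  else if ne.length > 1 then ".partial_mixed"
  else ""

-- B's final branching as a function of the flag state
def pvFinB (st : Bool × Option String × Bool) : String :=
  if st.2.2 || (st.2.1.isSome && st.1) then ".partial_mixed" else st.2.1.getD ""

-- B's step expressed directly on the suffix string
def pvStep (st : Bool × Option String × Bool) (s : String) : Bool × Option String × Bool :=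
  if s == "" then (true, st.2.1, st.2.2)
  else
    match st.2.1 with
    | none => (st.1, some s, st.2.2)
    | some f => if s == f then st else (st.1, st.2.1, true)

theorem pvInv (xs : List String) (acc : List String) (he : Bool) (first : Option String)
    (mx : Bool) (hnd : acc.Nodup)
    (h1 : he = acc.contains "")
    (h2 : first = (acc.filter (fun s => !(s == ""))).head?)
    (h3 : mx = decide (2 ≤ (acc.filter (fun s => !(s == ""))).length)) :
    pvFinA (xs.foldl PySem.Set.add acc) = pvFinB (xs.foldl pvStep (he, first, mx)) := by
  induction xs generalizing acc he first mx with
  | nil =>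
    subst h1 h2 h3
    simp only [List.foldl_nil, pvFinA, pvFinB]
    rcases hh : (acc.filter (fun s => !(s == ""))).head? with _ | v
    · rw [List.head?_eq_none_iff] at hh
      simp [hh]
    · have hne : acc.filter (fun s => !(s == "")) ≠ [] := by
        intro h; rw [h] at hh; simp at hh
      have hlen : 1 ≤ (acc.filter (fun s => !(s == ""))).length :=
        List.length_pos_of_ne_nil hne
      by_cases hE : acc.contains ""
      · have hmem0 : "" ∈ acc := by simpa using hE
        simp [hmem0, List.length_eq_zero_iff, hne]
      · by_cases h2' : 2 ≤ (acc.filter (fun s => !(s == ""))).length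
        · have hne1 : ¬ ((acc.filter (fun s => !(s == ""))).length == 1) = true := by
            simp; omega
          have hgt : (acc.filter (fun s => !(s == ""))).length > 1 := h2'
          simp [hne1, hgt]
        · have hone : (acc.filter (fun s => !(s == ""))).length = 1 := by omega
          obtain ⟨a, hl⟩ := List.length_eq_one_iff.mp hone
          have hav : a = v := by rw [hl] at hh; simpa using hh
          subst hav
          simp [hl]
  | cons x xs ih =>
    simp only [List.foldl_cons]
    by_cases hx : x == ""
    · have hxe : x = "" := by simpa using hx
      subst hxe
      by_cases hm : "" ∈ acc
      · have hadd : PySem.Set.add acc "" = acc := by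
          simp [PySem.Set.add, hm]
        rw [hadd]
        have hhe : he = true := by rw [h1]; simp [hm]
        have : pvStep (he, first, mx) "" = (he, first, mx) := by
          simp [pvStep, hhe]
        rw [this]
        exact ih acc he first mx hnd h1 h2 h3
      · have hadd : PySem.Set.add acc "" = acc ++ [""] := by
          simp [PySem.Set.add, hm]
        rw [hadd]
        have hstep : pvStep (he, first, mx) "" = (true, first, mx) := by simp [pvStep]
        rw [hstep]
        refine ih (acc ++ [""]) true first mx ?_ ?_ ?_ ?_
        · rw [List.nodup_append]
          refine ⟨hnd, List.nodup_singleton _, ?_⟩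
          simp
          intro a ha h
          exact hm (h ▸ ha)
        · simp
        · rw [h2]; simp
        · rw [h3]; simp
    · have hxs : ¬ x = "" := by simpa using hx
      by_cases hm : x ∈ acc
      · have hadd : PySem.Set.add acc x = acc := by simp [PySem.Set.add, hm]
        rw [hadd]
        have hmem : x ∈ acc.filter (fun s => !(s == "")) := by
          simp [List.mem_filter, hm, hxs]
        rcases hl : acc.filter (fun s => !(s == "")) with _ | ⟨w, rest⟩
        · rw [hl] at hmem; simp at hmem
        · have hfirst : first = some w := by rw [h2, hl]; rfl
          by_cases hw : x == w
          · have hstep : pvStep (he, first, mx) x = (he, first, mx) := by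
              simp [pvStep, hx, hfirst, hw]
            rw [hstep]
            exact ih acc he first mx hnd h1 h2 h3
          · -- x ≠ w, both in filter, nodup ⇒ length ≥ 2 ⇒ mx = true already
            have hxw : x ≠ w := by simpa using hw
            have hxrest : x ∈ rest := by
              have hm' : x ∈ w :: rest := by rw [hl] at hmem; exact hmem
              rcases List.mem_cons.mp hm' with h' | h'
              · exact absurd h' hxw
              · exact h' 
            have hlen : 2 ≤ (acc.filter (fun s => !(s == ""))).length := by
              rw [hl]
              have : 1 ≤ rest.length := List.length_pos_of_ne_nil (by
                intro h; rw [h] at hxrest; simp at hxrest)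
              simp; omega
            have hmx : mx = true := by rw [h3]; simpa using hlen
            have hstep : pvStep (he, first, mx) x = (he, first, mx) := by
              simp [pvStep, hx, hfirst, hw, hmx]
            rw [hstep]
            exact ih acc he first mx hnd h1 h2 h3
      · have hadd : PySem.Set.add acc x = acc ++ [x] := by simp [PySem.Set.add, hm]
        rw [hadd]
        have hfil : (acc ++ [x]).filter (fun s => !(s == "")) =
            acc.filter (fun s => !(s == "")) ++ [x] := by
          simp [List.filter_append, hx]
        have hnd' : (acc ++ [x]).Nodup := by
          rw [List.nodup_append]
          refine ⟨hnd, List.nodup_singleton _, ?_⟩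
          simp
          intro a ha h
          exact hm (h ▸ ha)
        rcases hl : acc.filter (fun s => !(s == "")) with _ | ⟨w, rest⟩
        · -- no non-empty yet: first = none
          have hfirst : first = none := by rw [h2, hl]; rfl
          have hstep : pvStep (he, first, mx) x = (he, some x, mx) := by
            simp [pvStep, hx, hfirst]
          rw [hstep]
          refine ih (acc ++ [x]) he (some x) mx hnd' ?_ ?_ ?_
          · rw [h1]; simp [Ne.symm hxs]
          · rw [hfil, hl]; rfl
          · rw [hfil, hl]; rw [h3, hl]; simp
        · have hfirst : first = some w := by rw [h2, hl]; rfl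
          have hwacc : w ∈ acc := (List.mem_filter.mp (by rw [hl]; simp)).1
          have hxw : ¬ x == w := by
            simp only [beq_iff_eq]
            intro h; exact hm (h ▸ hwacc)
          have hstep : pvStep (he, first, mx) x = (he, first, true) := by
            simp [pvStep, hx, hfirst, hxw]
          rw [hstep]
          refine ih (acc ++ [x]) he first true hnd' ?_ ?_ ?_
          · rw [h1]; simp [Ne.symm hxs]
          · rw [h2, hfil, hl]; simp
          · rw [hfil, hl]; simp

theorem build_aggregate_suffix_spec : Claim_equal_build_aggregate_suffix := by
  intro ts _
  unfold Spec_build_aggregate_suffix build_aggregate_suffix build_aggregate_suffix_alt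
  have hA : PySem.Set.ofList (ts.map (fun summary => PySem.Dict.getD (PySem.Dict.mk summary) "output_file_suffix" "")) =
      (ts.map (fun summary => PySem.Dict.getD (PySem.Dict.mk summary) "output_file_suffix" "")).foldl PySem.Set.add [] :=
    PySem.Set.ofList_eq_foldl _
  have hB : ts.foldl pvAltStep (false, none, false) =
      (ts.map (fun summary => PySem.Dict.getD (PySem.Dict.mk summary) "output_file_suffix" "")).foldl pvStep (false, none, false) := by
    rw [List.foldl_map]
    rfl
  have := pvInv (ts.map (fun summary => PySem.Dict.getD (PySem.Dict.mk summary) "output_file_suffix" ""))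
    [] false none false (by simp) (by simp) (by simp) (by simp)
  simp only [pvFinA, pvFinB] at this
  rw [hA, hB]
  exact this
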